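/- GENERATED by tools/from_farm_form.py from farm/worked/cos_poly/Proof.lean (a worked proof of the farm's unit `cos_poly`,
   accepted by the verdict) — do not edit. -/
import ProgX.Base.Spec.Units.cos_poly

open X86 X86.User Asan ProgX.Base

set_option maxRecDepth 4000
set_option maxHeartbeats 4000000

/-- `cos_poly(xmm0 = r)` satisfies its contract: 45 straight-line SSE instructions over constants of `.rodata`
(0x102040 … 0x102118, libm.c:194–206) and the `ret` (0x10211c); nothing is stored, so the shadow is untouched. -/
theorem ProgX.Base.Spec.Proved.cos_poly_ok : ProgX.Base.Spec.cos_poly.Statement := by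
  intro Lay hLay μ hμ u₀ hcode others frames u ret he hpre
  v_entry he
  have hsp := hpre.rsp
  u_walk hcode [hμ.vendor] span [ProgX.Base.L.textLo, ProgX.Base.L.textHi] side (v_side)
  -- 0x10211c `ret` (libm.c:206): the contract's `Returned`
  refine ReachVia.done ?_
  v_returned
  -- the post: no instruction stored anything, so no shadow byte was written
  show ShadowUntouched u.mem s_10211c.mem
  v_untouched
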